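-- pv_equiv track=rewrite | github.com/OpenAgentsInc/openagents-document-retrieval | main.py | convert_to_markdown_lite
-- ===== SOURCE A (Python) =====
-- def convert_to_markdown_lite(text):
--   """Applies basic markdown formatting (bold, italics, headers) - for plain text"""
--   # (unchanged from original script)
--   replacements = {
--       "<h1>": "## ",
--       "<h2>": "### ",
--       "<h3>": "#### ",
--       "<b>": "**",  # Bold
--       "</b>": "**",
--       "<strong>": "**",
--       "</strong>": "**",
--       "<i>": "*",  # Italics
--       "<i>": "*",
--   }
--   for before, after in replacements.items():
--     text = text.replace(before, after)
--   return text.strip()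
-- ===== SOURCE B (Python) =====
-- def convert_to_markdown_lite(text):
--   """Applies basic markdown formatting (bold, italics, headers) - for plain text"""
--   pairs = [
--       ("<h1>", "## "),
--       ("<h2>", "### "),
--       ("<h3>", "#### "),
--       ("<b>", "**"),
--       ("</b>", "**"),
--       ("<strong>", "**"),
--       ("</strong>", "**"),
--       ("<i>", "*"),
--   ]
--   out = []
--   i = 0
--   n = len(text)
--   while i < n:
--     for tag, md in pairs:
--       if text.startswith(tag, i):
--         out.append(md)
--         i += len(tag)
--         break
--     else:
--       out.append(text[i])
--       i += 1
--   return "".join(out).strip()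
-- ===== Notes on version B (the rewrite author's own statement) =====
-- stated objective: alternative
-- what changed: A runs eight sequential full-text str.replace passes (one per table entry); B does a single left-to-right scan of the text, matching a tag at each position and emitting its markdown replacement directly.
import Mathlib
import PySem

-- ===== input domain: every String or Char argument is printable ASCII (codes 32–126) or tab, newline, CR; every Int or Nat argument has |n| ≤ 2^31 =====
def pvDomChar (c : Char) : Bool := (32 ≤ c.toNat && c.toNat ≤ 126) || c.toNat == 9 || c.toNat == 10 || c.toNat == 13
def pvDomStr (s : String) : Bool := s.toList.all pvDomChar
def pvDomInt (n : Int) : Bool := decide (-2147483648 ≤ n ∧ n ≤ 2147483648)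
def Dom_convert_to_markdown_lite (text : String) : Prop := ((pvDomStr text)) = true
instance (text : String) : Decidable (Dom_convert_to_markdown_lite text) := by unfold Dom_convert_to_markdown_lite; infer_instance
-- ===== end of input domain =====

-- B replaces A's eight sequential full-text `str.replace` passes by ONE left-to-right scan that
-- matches a tag at each position and emits its markdown replacement (objective: alternative,
-- single pass instead of one pass per table entry; return value only, no mutation involved).

-- ===== PORT A =====
-- A's dict in insertion order (the duplicate "<i>" key collapses to one entry, as in Python).
def pvTableA : List (String × String) :=
  [("<h1>", "## "), ("<h2>", "### "), ("<h3>", "#### "), ("<b>", "**"),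
   ("</b>", "**"), ("<strong>", "**"), ("</strong>", "**"), ("<i>", "*")]

def convert_to_markdown_lite (text : String) : String :=
  PySem.Str.strip (pvTableA.foldl (fun t p => PySem.Str.replace t p.1 p.2) text)

-- ===== PORT B =====
-- B's pair list, on char lists (B scans the text position by position).
def pvPairsB : List (List Char × List Char) :=
  [("<h1>".toList, "## ".toList), ("<h2>".toList, "### ".toList),
   ("<h3>".toList, "#### ".toList), ("<b>".toList, "**".toList),
   ("</b>".toList, "**".toList), ("<strong>".toList, "**".toList),
   ("</strong>".toList, "**".toList), ("<i>".toList, "*".toList)]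

-- used by pvScan's decreasing_by: every tag is nonempty
theorem pvPairsB_fst_ne_nil : ∀ p ∈ pvPairsB, p.1 ≠ [] := by decide

-- the while-loop of B: at each position, emit the first matching tag's replacement and jump
-- over the tag, else copy the character
def pvScan : List Char → List Char
  | [] => []
  | c :: t =>
    match h : pvPairsB.find? (fun p => p.1.isPrefixOf (c :: t)) with
    | some q => q.2 ++ pvScan (List.drop q.1.length (c :: t))
    | none => c :: pvScan t
termination_by cs => cs.length
decreasing_by
  · have hm := List.mem_of_find?_eq_some h
    have hne : q.1 ≠ [] := pvPairsB_fst_ne_nil q hm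
    have : 0 < q.1.length := List.length_pos_of_ne_nil hne
    simp only [List.length_drop, List.length_cons]
    omega
  · simp

def convert_to_markdown_lite_alt (text : String) : String :=
  String.ofList (PySem.Chars.strip (pvScan text.toList))

-- ===== PRECONDITION & SPEC =====
def Spec_convert_to_markdown_lite (text : String) (out : String) : Prop := out = convert_to_markdown_lite_alt text
instance (text : String) (out : String) : Decidable (Spec_convert_to_markdown_lite text out) := by unfold Spec_convert_to_markdown_lite; infer_instance

-- ===== CLAIM (what is proved, stated in full; the proofs are below) =====
def Claim_equal_convert_to_markdown_lite : Prop := ∀ (text : String), Dom_convert_to_markdown_lite text → Spec_convert_to_markdown_lite text (convert_to_markdown_lite text)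

-- ===== LEMMAS AND PROOFS =====

-- characters a replacement string may consist of
def pvRepChar (c : Char) : Bool := c == '#' || c == '*' || c == ' '

-- a well-formed table pair: tag starts with '<', its tail has no '<' and no replacement char,
-- the replacement is nonempty and made of replacement chars only
def pvGood (p : List Char × List Char) : Bool :=
  p.1.head? == some '<' && p.1.tail.all (fun c => !pvRepChar c && c != '<') &&
  !p.2.isEmpty && p.2.all pvRepChar

theorem pvGood_pvPairsB : ∀ p ∈ pvPairsB, pvGood p = true := by decide

theorem pvPairsB_pairwise :
    (pvPairsB.map Prod.fst).Pairwise (fun a b => ¬ a <+: b ∧ ¬ b <+: a) := by decide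

-- ---- basic facts about PySem.Chars.replace ----

theorem pv_go_acc (old new : List Char) :
    ∀ fuel l acc, PySem.Chars.replace.go old new fuel l acc
      = acc.reverse ++ PySem.Chars.replace.go old new fuel l [] := by
  intro fuel
  induction fuel with
  | zero => intro l acc; simp [PySem.Chars.replace.go]
  | succ n ih =>
    intro l acc
    cases l with
    | nil => simp [PySem.Chars.replace.go]
    | cons c t =>
      simp only [PySem.Chars.replace.go]
      by_cases hp : old.isPrefixOf (c :: t)
      · rw [if_pos hp, if_pos hp, ih _ (new.reverse ++ acc), ih _ (new.reverse ++ [])]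
        simp
      · rw [if_neg hp, if_neg hp, ih t (c :: acc), ih t [c]]
        simp

theorem pv_go_fuel (old new : List Char) (h0 : old ≠ []) :
    ∀ fuel fuel' l, l.length ≤ fuel → l.length ≤ fuel' →
      PySem.Chars.replace.go old new fuel l [] = PySem.Chars.replace.go old new fuel' l [] := by
  intro fuel
  induction fuel with
  | zero =>
    intro fuel' l hl _
    have : l = [] := List.eq_nil_of_length_eq_zero (Nat.le_zero.mp hl)
    subst this
    cases fuel' <;> simp [PySem.Chars.replace.go]
  | succ n ih =>
    intro fuel' l hl hl'
    cases l with
    | nil => cases fuel' <;> simp [PySem.Chars.replace.go]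
    | cons c t =>
      cases fuel' with
      | zero => simp at hl'
      | succ m =>
        simp only [PySem.Chars.replace.go]
        by_cases hp : old.isPrefixOf (c :: t)
        · rw [if_pos hp, if_pos hp, pv_go_acc, pv_go_acc old new m]
          have hpre : old <+: (c :: t) := List.isPrefixOf_iff_prefix.mp hp
          have hlen : 0 < old.length := List.length_pos_of_ne_nil h0
          have hle : old.length ≤ (c :: t).length := hpre.length_le
          simp only [List.length_cons] at hl hl' hle
          have hdl : (List.drop old.length (c :: t)).length ≤ n := by
            simp only [List.length_drop, List.length_cons]; omega
          have hdl' : (List.drop old.length (c :: t)).length ≤ m := by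
            simp only [List.length_drop, List.length_cons]; omega
          rw [ih _ _ hdl hdl']
        · rw [if_neg hp, if_neg hp, pv_go_acc, pv_go_acc old new m]
          simp only [List.length_cons] at hl hl'
          have ht : t.length ≤ n := by omega
          have ht' : t.length ≤ m := by omega
          rw [ih _ _ ht ht']

theorem pv_replace_nil (old new : List Char) (h0 : old ≠ []) :
    PySem.Chars.replace [] old new = [] := by
  rw [PySem.Chars.replace]
  rw [if_neg (by simp [List.isEmpty_iff, h0])]
  simp [PySem.Chars.replace.go]

theorem pv_replace_cons (old new : List Char) (c : Char) (s : List Char)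
    (h0 : old ≠ []) (h : ¬ old <+: (c :: s)) :
    PySem.Chars.replace (c :: s) old new = c :: PySem.Chars.replace s old new := by
  have hp : old.isPrefixOf (c :: s) = false := by
    rw [Bool.eq_false_iff]; intro hc; exact h (List.isPrefixOf_iff_prefix.mp hc)
  rw [PySem.Chars.replace, PySem.Chars.replace,
    if_neg (by simp [List.isEmpty_iff, h0]), if_neg (by simp [List.isEmpty_iff, h0])]
  simp only [List.length_cons, PySem.Chars.replace.go, hp, Bool.false_eq_true, if_false]
  rw [pv_go_acc]
  rfl

theorem pv_replace_append (old new s : List Char) (h0 : old ≠ []) :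
    PySem.Chars.replace (old ++ s) old new = new ++ PySem.Chars.replace s old new := by
  obtain ⟨a, o, rfl⟩ := List.exists_cons_of_ne_nil h0
  rw [PySem.Chars.replace, PySem.Chars.replace,
    if_neg (by simp), if_neg (by simp)]
  have hp : (a :: o).isPrefixOf ((a :: o) ++ s) = true :=
    List.isPrefixOf_iff_prefix.mpr (List.prefix_append _ _)
  simp only [List.cons_append, List.length_cons, List.length_append, PySem.Chars.replace.go]
  rw [show (a :: o) ++ s = a :: (o ++ s) from rfl] at hp
  simp only [hp, if_true]
  have hdrop : List.drop (o.length + 1) (a :: (o ++ s)) = s := by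
    simpa using List.drop_left (l₁ := a :: o) (l₂ := s)
  rw [hdrop, pv_go_acc]
  simp only [List.append_nil, List.reverse_reverse]
  congr 1
  exact pv_go_fuel _ new (by simp) _ _ s (by omega) (le_refl _)

theorem pv_no_lt_pass (old new : List Char) (ho : old.head? = some '<')
    (u v : List Char) (hu : '<' ∉ u) :
    PySem.Chars.replace (u ++ v) old new = u ++ PySem.Chars.replace v old new := by
  have h0 : old ≠ [] := by intro h; subst h; simp at ho
  induction u with
  | nil => simp
  | cons c u' ih =>
    have hcu : c ≠ '<' := by intro h; exact hu (h ▸ List.mem_cons_self ..)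
    have hnp : ¬ old <+: (c :: (u' ++ v)) := by
      intro hp
      obtain ⟨a, o, rfl⟩ := List.exists_cons_of_ne_nil h0
      have : a = '<' := by simpa using ho
      subst this
      rw [List.cons_prefix_cons] at hp
      exact hcu hp.1.symm
    rw [List.cons_append, pv_replace_cons _ _ _ _ h0 hnp,
      ih (fun hm => hu (List.mem_cons_of_mem _ hm))]
    simp

theorem pv_replace_skip (old new told rest : List Char)
    (ho : old.head? = some '<') (ht : told.head? = some '<') (htl : '<' ∉ told.tail)
    (h2 : ¬ old <+: told) (h3 : ¬ told <+: old) :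
    PySem.Chars.replace (told ++ rest) old new = told ++ PySem.Chars.replace rest old new := by
  have h0 : old ≠ [] := by intro h; subst h; simp at ho
  obtain ⟨a, mid, rfl⟩ : ∃ a mid, told = a :: mid := by
    cases told with
    | nil => simp at ht
    | cons a m => exact ⟨a, m, rfl⟩
  have ha : a = '<' := by simpa using ht
  subst ha
  have hnp : ¬ old <+: ('<' :: mid) ++ rest := by
    intro hp
    rcases List.prefix_or_prefix_of_prefix hp (List.prefix_append _ _) with h | h
    · exact h2 h
    · exact h3 h
  rw [List.cons_append, pv_replace_cons _ _ _ _ h0 (by simpa using hnp),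
    pv_no_lt_pass old new ho mid rest (by simpa using htl)]
  simp

theorem pv_prefix_unreplace (old new : List Char) (h0 : old ≠ []) (hn : new ≠ [])
    (hnc : ∀ c ∈ new, pvRepChar c = true) :
    ∀ u w, (∀ c ∈ w, pvRepChar c = false) → w <+: PySem.Chars.replace u old new → w <+: u := by
  intro u
  induction u with
  | nil =>
    intro w _ hw
    rw [pv_replace_nil _ _ h0] at hw
    exact hw
  | cons c u' ih =>
    intro w hwc hw
    by_cases hp : old <+: (c :: u')
    · obtain ⟨d, n', rfl⟩ := List.exists_cons_of_ne_nil hn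
      have heq := List.prefix_iff_eq_append.mp hp
      rw [← heq, pv_replace_append _ _ _ h0] at hw
      cases w with
      | nil => exact List.nil_prefix
      | cons e w' =>
        rw [List.cons_append, List.cons_prefix_cons] at hw
        have : pvRepChar e = false := hwc e (List.mem_cons_self ..)
        have : pvRepChar d = true := hnc d (List.mem_cons_self ..)
        simp_all
    · rw [pv_replace_cons _ _ _ _ h0 hp] at hw
      cases w with
      | nil => exact List.nil_prefix
      | cons e w' =>
        rw [List.cons_prefix_cons] at hw ⊢
        exact ⟨hw.1, ih w' (fun c hc => hwc c (List.mem_cons_of_mem _ hc)) hw.2⟩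

-- ---- facts about the fold over the whole table ----

theorem pv_fold_nil (ps : List (List Char × List Char)) (h0 : ∀ p ∈ ps, p.1 ≠ []) :
    ps.foldl (fun s q => PySem.Chars.replace s q.1 q.2) [] = [] := by
  induction ps with
  | nil => rfl
  | cons q qs ih =>
    simp only [List.foldl_cons]
    rw [pv_replace_nil _ _ (h0 q (List.mem_cons_self ..))]
    exact ih (fun p hp => h0 p (List.mem_cons_of_mem _ hp))

theorem pv_fold_pass (ps : List (List Char × List Char))
    (hh : ∀ p ∈ ps, p.1.head? = some '<') (u : List Char) (hu : '<' ∉ u) :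
    ∀ v, ps.foldl (fun s q => PySem.Chars.replace s q.1 q.2) (u ++ v)
      = u ++ ps.foldl (fun s q => PySem.Chars.replace s q.1 q.2) v := by
  induction ps with
  | nil => intro v; rfl
  | cons q qs ih =>
    intro v
    simp only [List.foldl_cons]
    rw [pv_no_lt_pass q.1 q.2 (hh q (List.mem_cons_self ..)) u v hu]
    exact ih (fun p hp => hh p (List.mem_cons_of_mem _ hp)) _

theorem pv_good_head {p : List Char × List Char} (hg : pvGood p = true) :
    p.1.head? = some '<' := by
  simp only [pvGood, Bool.and_eq_true, beq_iff_eq] at hg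
  exact hg.1.1.1

theorem pv_good_ne_nil {p : List Char × List Char} (hg : pvGood p = true) : p.1 ≠ [] := by
  intro h
  have := pv_good_head hg
  rw [h] at this
  simp at this

theorem pv_fold_nomatch (ps : List (List Char × List Char))
    (hg : ∀ p ∈ ps, pvGood p = true) :
    ∀ v, (∀ p ∈ ps, ¬ p.1 <+: ('<' :: v)) →
      ps.foldl (fun s q => PySem.Chars.replace s q.1 q.2) ('<' :: v)
        = '<' :: ps.foldl (fun s q => PySem.Chars.replace s q.1 q.2) v := by
  induction ps with
  | nil => intro v _; rfl
  | cons q qs ih =>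
    intro v h
    have hgq := hg q (List.mem_cons_self ..)
    simp only [List.foldl_cons]
    rw [pv_replace_cons _ _ _ _ (pv_good_ne_nil hgq) (h q (List.mem_cons_self ..))]
    refine ih (fun p hp => hg p (List.mem_cons_of_mem _ hp)) _ ?_
    intro p hp hpre
    have hgp := hg p (List.mem_cons_of_mem _ hp)
    obtain ⟨a, w, hpe⟩ : ∃ a w, p.1 = a :: w := by
      cases hpw : p.1 with
      | nil => exact absurd hpw (pv_good_ne_nil hgp)
      | cons a w => exact ⟨a, w, rfl⟩
    have ha : a = '<' := by have := pv_good_head hgp; rw [hpe] at this; simpa using this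
    subst ha
    rw [hpe, List.cons_prefix_cons] at hpre
    -- w is the tag's tail: no replacement characters in it
    have hwrc : ∀ c ∈ w, pvRepChar c = false := by
      intro c hc
      simp only [pvGood, Bool.and_eq_true, List.all_eq_true] at hgp
      have := hgp.1.1.2 c (by rw [hpe]; exact hc)
      simpa using this.1
    have hq2 : q.2 ≠ [] := by
      simp only [pvGood, Bool.and_eq_true] at hgq
      simpa [List.isEmpty_iff] using hgq.1.2
    have hq2c : ∀ c ∈ q.2, pvRepChar c = true := by
      simp only [pvGood, Bool.and_eq_true, List.all_eq_true] at hgq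
      exact hgq.2
    have := pv_prefix_unreplace q.1 q.2 (pv_good_ne_nil hgq) hq2 hq2c v w hwrc hpre.2
    exact h p (List.mem_cons_of_mem _ hp) (by rw [hpe, List.cons_prefix_cons]; exact ⟨rfl, this⟩)

theorem pv_fold_match (ps : List (List Char × List Char))
    (hg : ∀ p ∈ ps, pvGood p = true)
    (hpw : (ps.map Prod.fst).Pairwise (fun a b => ¬ a <+: b ∧ ¬ b <+: a))
    (tag rep : List Char) (hmem : (tag, rep) ∈ ps) :
    ∀ rest, ps.foldl (fun s q => PySem.Chars.replace s q.1 q.2) (tag ++ rest)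
      = rep ++ ps.foldl (fun s q => PySem.Chars.replace s q.1 q.2) rest := by
  induction ps with
  | nil => exact absurd hmem (List.not_mem_nil)
  | cons q qs ih =>
    intro rest
    have hgq := hg q (List.mem_cons_self ..)
    simp only [List.map_cons, List.pairwise_cons] at hpw
    rcases List.mem_cons.mp hmem with heq | hmem'
    · -- q is the matching pair
      subst heq
      simp only [List.foldl_cons]
      rw [pv_replace_append _ _ _ (pv_good_ne_nil hgq)]
      have hq2c : ∀ c ∈ rep, pvRepChar c = true := by
        simp only [pvGood, Bool.and_eq_true, List.all_eq_true] at hgq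
        exact hgq.2
      have hnolt : '<' ∉ rep := by
        intro hm
        have := hq2c '<' hm
        simp [pvRepChar] at this
      exact pv_fold_pass qs (fun p hp => pv_good_head (hg p (List.mem_cons_of_mem _ hp)))
        rep hnolt _
    · -- q is an earlier, non-matching pair: it passes the tag through
      have hgt := hg (tag, rep) (List.mem_cons_of_mem _ hmem')
      have hinc := hpw.1 tag (List.mem_map_of_mem hmem')
      have htl : '<' ∉ tag.tail := by
        intro hm
        simp only [pvGood, Bool.and_eq_true, List.all_eq_true] at hgt
        have := hgt.1.1.2 '<' hm
        simp at this
      simp only [List.foldl_cons]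
      rw [pv_replace_skip q.1 q.2 tag rest (pv_good_head hgq) (pv_good_head hgt) htl
        hinc.1 hinc.2]
      exact ih (fun p hp => hg p (List.mem_cons_of_mem _ hp)) hpw.2 hmem' _

-- ---- the main equivalence on char lists ----

set_option maxHeartbeats 1000000 in
theorem pv_fold_eq_scan (cs : List Char) :
    pvPairsB.foldl (fun s q => PySem.Chars.replace s q.1 q.2) cs = pvScan cs := by
  induction cs using pvScan.induct with
  | case1 =>
    simp only [pvScan]
    exact pv_fold_nil _ pvPairsB_fst_ne_nil
  | case2 c t q h ih =>
    have hmem := List.mem_of_find?_eq_some h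
    have hfs := List.find?_some h
    have hpre : q.1 <+: (c :: t) := List.isPrefixOf_iff_prefix.mp (by simpa using hfs)
    have heq := List.prefix_iff_eq_append.mp hpre
    have hrhs : pvScan (c :: t) = q.2 ++ pvScan (List.drop q.1.length (c :: t)) := by
      rw [pvScan]
      split
      · rename_i q' h'
        rw [h'] at h
        injection h with h2
        rw [h2]
      · rename_i h'
        rw [h'] at h
        cases h
    rw [hrhs]
    conv_lhs => rw [← heq]
    rw [pv_fold_match pvPairsB pvGood_pvPairsB pvPairsB_pairwise q.1 q.2 (by simpa using hmem),
      ih]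
  | case3 c t h ih =>
    have hnone : ∀ p ∈ pvPairsB, ¬ p.1 <+: (c :: t) := by
      intro p hp hpre
      have := List.find?_eq_none.mp h p hp
      exact this (List.isPrefixOf_iff_prefix.mpr hpre)
    have hrhs : pvScan (c :: t) = c :: pvScan t := by
      rw [pvScan]
      split
      · rename_i q' h'
        rw [h'] at h
        cases h
      · rfl
    rw [hrhs]
    by_cases hc : c = '<'
    · subst hc
      rw [pv_fold_nomatch pvPairsB pvGood_pvPairsB t hnone, ih]
    · have hcu : '<' ∉ [c] := by simpa using fun h : '<' = c => hc h.symm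
      have hsplit : c :: t = [c] ++ t := rfl
      rw [hsplit, pv_fold_pass pvPairsB (fun p hp => pv_good_head (pvGood_pvPairsB p hp)) [c]
        hcu t, ih]
      rfl

theorem pv_fold_str (ps : List (String × String)) :
    ∀ s : String, (ps.foldl (fun t p => PySem.Str.replace t p.1 p.2) s).toList
      = (ps.map (fun p => (p.1.toList, p.2.toList))).foldl
          (fun l q => PySem.Chars.replace l q.1 q.2) s.toList := by
  induction ps with
  | nil => intro s; rfl
  | cons p ps ih =>
    intro s
    simp only [List.foldl_cons, List.map_cons]
    rw [ih, PySem.Str.toList_replace]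

-- ===== VERDICT (by name: the statement is the Claim_ definition above) =====
theorem convert_to_markdown_lite_spec : Claim_equal_convert_to_markdown_lite := by
  intro text _
  unfold Spec_convert_to_markdown_lite convert_to_markdown_lite convert_to_markdown_lite_alt
  rw [← String.toList_inj, PySem.Str.toList_strip, pv_fold_str]
  have htab : pvTableA.map (fun p => (p.1.toList, p.2.toList)) = pvPairsB := by decide
  rw [htab, pv_fold_eq_scan, String.toList_ofList]
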